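-- pv_equiv track=rewrite | github.com/MrBrantCode/unitest_baseline | mut_generate/mist_train_taco/taco_9774/solution.py | is_funny_string
-- ===== SOURCE A (Python) =====
-- def is_funny_string(s: str) -> str:
--     def reverse(str_to_reverse: str) -> str:
--         return str_to_reverse[::-1]
--
--     def get_ascii_diffs(string: str) -> list:
--         return [abs(ord(string[i]) - ord(string[i - 1])) for i in range(1, len(string))]
--
--     reversed_s = reverse(s)
--     diffs_s = get_ascii_diffs(s)
--     diffs_reversed_s = get_ascii_diffs(reversed_s)
--
--     if diffs_s == diffs_reversed_s:
--         return "Funny"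
--     else:
--         return "Not Funny"
-- ===== SOURCE B (Python) =====
-- def is_funny_string(s: str) -> str:
--     diffs = [abs(ord(a) - ord(b)) for a, b in zip(s, s[1:])]
--     i, j = 0, len(diffs) - 1
--     while i < j:
--         if diffs[i] != diffs[j]:
--             return "Not Funny"
--         i += 1
--         j -= 1
--     return "Funny"
-- ===== Notes on version B (the rewrite author's own statement) =====
-- stated objective: simpler
-- what changed: B builds the ASCII-diff list once (zip of adjacent chars) and decides funniness with a two-pointer palindrome loop with early exit, instead of constructing the reversed string, a second diff list, and comparing two lists.
import Mathlib
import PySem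

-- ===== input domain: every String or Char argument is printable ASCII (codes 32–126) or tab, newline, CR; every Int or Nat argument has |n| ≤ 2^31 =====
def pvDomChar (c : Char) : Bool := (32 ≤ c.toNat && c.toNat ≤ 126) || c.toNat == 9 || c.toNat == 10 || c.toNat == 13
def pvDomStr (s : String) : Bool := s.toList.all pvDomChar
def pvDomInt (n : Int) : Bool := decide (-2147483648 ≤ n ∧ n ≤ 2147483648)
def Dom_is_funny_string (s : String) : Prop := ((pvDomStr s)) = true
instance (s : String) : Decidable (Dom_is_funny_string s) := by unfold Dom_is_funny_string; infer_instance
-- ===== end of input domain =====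

-- B builds the diff list once and uses a two-pointer palindrome loop with early exit,
-- instead of A's reversed string + second diff list + list comparison (simpler decomposition).


-- ===== PORT A =====
-- reverse(str): str_to_reverse[::-1]
def pvReverse (l : List Char) : List Char :=
  (PySem.List.slice? l none none (-1)).getD []

-- get_ascii_diffs: [abs(ord(string[i]) - ord(string[i-1])) for i in range(1, len(string))]
def pvGetAsciiDiffs (l : List Char) : List Int :=
  (PySem.List.pyRange 1 (l.length : Int) 1).map (fun i =>
    |((PySem.List.pyGetD l i ' ').toNat : Int) - ((PySem.List.pyGetD l (i - 1) ' ').toNat : Int)|)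

def is_funny_string (s : String) : String :=
  let l := s.toList
  let reversed_s := pvReverse l
  let diffs_s := pvGetAsciiDiffs l
  let diffs_reversed_s := pvGetAsciiDiffs reversed_s
  if diffs_s = diffs_reversed_s then "Funny" else "Not Funny"

-- ===== PORT B =====
-- diffs = [abs(ord(a) - ord(b)) for a, b in zip(s, s[1:])]
def pvDiffs (l : List Char) : List Int :=
  (l.zip l.tail).map (fun p => |((p.1.toNat : Int)) - ((p.2.toNat : Int))|)

-- the two-pointer while loop: i, j move inward, early exit on first mismatch
def pvPalLoop (d : List Int) (i j : Int) : String :=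
  if _h : i < j then
    if PySem.List.pyGetD d i 0 ≠ PySem.List.pyGetD d j 0 then "Not Funny"
    else pvPalLoop d (i + 1) (j - 1)
  else "Funny"
termination_by (j - i).toNat
decreasing_by omega

def is_funny_string_alt (s : String) : String :=
  let diffs := pvDiffs s.toList
  pvPalLoop diffs 0 ((diffs.length : Int) - 1)

-- ===== PRECONDITION & SPEC =====
def Spec_is_funny_string (s : String) (out : String) : Prop := out = is_funny_string_alt s
instance (s : String) (out : String) : Decidable (Spec_is_funny_string s out) := by unfold Spec_is_funny_string; infer_instance

-- ===== CLAIM (what is proved, stated in full; the proofs are below) =====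
def Claim_equal_is_funny_string : Prop := ∀ (s : String), Dom_is_funny_string s → Spec_is_funny_string s (is_funny_string s)

-- ===== LEMMAS AND PROOFS =====

-- index congruence for getElem (used to move between equal Nat indices)
theorem pvGetIdx {α : Type} (l : List α) {i j : Nat} (h : i = j) (hi : i < l.length) :
    l[i] = l[j]'(h ▸ hi) := by subst h; rfl

theorem pvReverse_eq (l : List Char) : pvReverse l = l.reverse := by
  simp [pvReverse, PySem.List.slice?_none_none_neg_one]

theorem pvDiffs_length (l : List Char) : (pvDiffs l).length = l.length - 1 := by
  simp [pvDiffs]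

theorem pvDiffs_getElem (l : List Char) (k : Nat) (hk : k + 1 < l.length) :
    (pvDiffs l)[k]'(by simp [pvDiffs]; omega) =
      |((l[k]'(by omega)).toNat : Int) - ((l[k + 1]'hk).toNat : Int)| := by
  simp [pvDiffs]

theorem pvGetAsciiDiffs_eq (l : List Char) : pvGetAsciiDiffs l = pvDiffs l := by
  apply List.ext_getElem
  · simp [pvGetAsciiDiffs, pvDiffs]
  · intro k h1 h2
    have hk : k + 1 < l.length := by
      simp [pvGetAsciiDiffs] at h1; omega
    rw [pvDiffs_getElem l k hk]
    simp only [pvGetAsciiDiffs, List.getElem_map, PySem.List.getElem_pyRange_one]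
    rw [show (1 : Int) + k = ((k + 1 : Nat) : Int) from by push_cast; ring]
    rw [show ((k + 1 : Nat) : Int) - 1 = ((k : Nat) : Int) from by push_cast; ring]
    rw [PySem.List.pyGetD_natCast, PySem.List.pyGetD_natCast]
    rw [List.getD_eq_getElem _ _ hk, List.getD_eq_getElem _ _ (by omega)]
    rw [abs_sub_comm]

theorem pvDiffs_reverse (l : List Char) : pvDiffs l.reverse = (pvDiffs l).reverse := by
  apply List.ext_getElem
  · simp [pvDiffs]
  · intro k h1 h2
    have hn : (pvDiffs l).length = l.length - 1 := pvDiffs_length l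
    have hk : k < l.length - 1 := by rw [List.length_reverse] at h2; omega
    rw [List.getElem_reverse]
    rw [pvDiffs_getElem l.reverse k (by simp; omega)]
    rw [pvDiffs_getElem l ((pvDiffs l).length - 1 - k) (by omega)]
    rw [List.getElem_reverse, List.getElem_reverse]
    rw [abs_sub_comm]
    rw [pvGetIdx l (show l.length - 1 - (k + 1) = (pvDiffs l).length - 1 - k from by omega)]
    rw [pvGetIdx l (show l.length - 1 - k = (pvDiffs l).length - 1 - k + 1 from by omega)]

-- the two-pointer loop decides palindromicity of d, given the already-checked prefix
theorem pvPalLoop_spec (d : List Int) : ∀ (m i : Nat),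
    d.length - 2 * i ≤ m →
    (∀ k, (hk : k < i) → (hk' : k < d.length) → d[k]'hk' = d[d.length - 1 - k]'(by omega)) →
    pvPalLoop d i ((d.length : Int) - 1 - i) =
      if d = d.reverse then "Funny" else "Not Funny" := by
  intro m
  induction m with
  | zero =>
    intro i hm h
    have hpal : d = d.reverse := by
      apply List.ext_getElem (by simp)
      intro k hk _
      rw [List.getElem_reverse]
      rcases lt_or_ge k i with hki | hki
      · exact h k hki hk
      · have hki' : d.length - 1 - k < i := by omega
        rw [h (d.length - 1 - k) hki' (by omega)]
        exact pvGetIdx d (by omega) _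
    rw [pvPalLoop, dif_neg (by omega), if_pos hpal]
  | succ m ih =>
    intro i hm h
    rw [pvPalLoop]
    by_cases hij : (i : Int) < (d.length : Int) - 1 - i
    · rw [dif_pos hij]
      have hi : i < d.length := by omega
      have hj : d.length - 1 - i < d.length := by omega
      have hji : (d.length : Int) - 1 - i = ((d.length - 1 - i : Nat) : Int) := by omega
      rw [hji, PySem.List.pyGetD_natCast, PySem.List.pyGetD_natCast,
          List.getD_eq_getElem _ _ hi, List.getD_eq_getElem _ _ hj]
      by_cases heq : d[i] = d[d.length - 1 - i]
      · rw [if_neg (by simpa using heq)]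
        rw [show ((i : Int) + 1) = ((i + 1 : Nat) : Int) from by push_cast; ring]
        rw [show ((d.length - 1 - i : Nat) : Int) - 1 = (d.length : Int) - 1 - ((i + 1 : Nat) : Int) from by push_cast; omega]
        apply ih (i + 1) (by omega)
        intro k hk hk'
        rcases lt_or_ge k i with hki | hki
        · exact h k hki hk'
        · have hki2 : k = i := by omega
          subst hki2
          rw [heq]
      · rw [if_pos (by simpa using heq)]
        rw [if_neg]
        intro hpal
        apply heq
        have h2 : d[i]'hi = d.reverse[i]'(by simpa using hi) := List.getElem_of_eq hpal hi
        rw [List.getElem_reverse] at h2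
        exact h2.trans (pvGetIdx d (by omega) _)
    · rw [dif_neg hij]
      have hpal : d = d.reverse := by
        apply List.ext_getElem (by simp)
        intro k hk _
        rw [List.getElem_reverse]
        rcases lt_or_ge k i with hki | hki
        · exact h k hki hk
        · rcases lt_or_ge (d.length - 1 - k) i with hki' | hki'
          · rw [h (d.length - 1 - k) hki' (by omega)]
            exact pvGetIdx d (by omega) _
          · exact pvGetIdx d (by omega) _
      rw [if_pos hpal]

theorem pvPalLoop_full (d : List Int) :
    pvPalLoop d 0 ((d.length : Int) - 1) =
      if d = d.reverse then "Funny" else "Not Funny" := by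
  have := pvPalLoop_spec d d.length 0 (by omega)
    (by intro k hk hk'; exact absurd hk (Nat.not_lt_zero k))
  simpa using this

-- ===== VERDICT (by name: the statement is the Claim_ definition above) =====
theorem is_funny_string_spec : Claim_equal_is_funny_string := by
  intro s _
  unfold Spec_is_funny_string is_funny_string is_funny_string_alt
  simp only [pvReverse_eq, pvGetAsciiDiffs_eq, pvDiffs_reverse, pvPalLoop_full]
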